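-- pv_equiv track=rewrite | github.com/joo9906/Algorithm_study | pyprac/baekjoon/백준-3월.py | bigfind
-- ===== SOURCE A (Python) =====
-- def bigfind(n, arr):
--     result1 = 0
--     result2 = 0
--
--     for k in range(n):
--         if n - k < result1:
--             break
--         i = k
--         cnt = 1
--         while i + 1 < n and arr[i] <= arr[i + 1]:  # 증가
--             cnt += 1
--             i += 1
--
--         result1 = max(result1, cnt)
--
--     for j in range(n):
--         if n - j < result2:
--             break
--         num = j
--         cnt = 1
--         while num + 1 < n and arr[num] >= arr[num + 1]:  # 감소
--             cnt += 1
--             num += 1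
--
--         result2 = max(result2, cnt)
--
--     return max(result1, result2)
-- ===== SOURCE B (Python) =====
-- def bigfind(n, arr):
--     if n <= 0:
--         return 0
--     best = inc = dec = 1
--     for k in reversed(range(n - 1)):
--         inc = inc + 1 if arr[k] <= arr[k + 1] else 1
--         dec = dec + 1 if arr[k] >= arr[k + 1] else 1
--         best = max(max(best, inc), dec)
--     return best
-- ===== Notes on version B (the rewrite author's own statement) =====
-- stated objective: alternative
-- what changed: A rescans a run from every start index (two passes of nested loops with a heuristic break); B computes each run length from the next one by a single backward dynamic-programming pass over the array, tracking the increasing run, the decreasing run and the best so far.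
-- outside the precondition, e.g. on bigfind(7, [-2, -2, -2, 1, -4, 3]): A returns 4, B raises IndexError
import Mathlib
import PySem

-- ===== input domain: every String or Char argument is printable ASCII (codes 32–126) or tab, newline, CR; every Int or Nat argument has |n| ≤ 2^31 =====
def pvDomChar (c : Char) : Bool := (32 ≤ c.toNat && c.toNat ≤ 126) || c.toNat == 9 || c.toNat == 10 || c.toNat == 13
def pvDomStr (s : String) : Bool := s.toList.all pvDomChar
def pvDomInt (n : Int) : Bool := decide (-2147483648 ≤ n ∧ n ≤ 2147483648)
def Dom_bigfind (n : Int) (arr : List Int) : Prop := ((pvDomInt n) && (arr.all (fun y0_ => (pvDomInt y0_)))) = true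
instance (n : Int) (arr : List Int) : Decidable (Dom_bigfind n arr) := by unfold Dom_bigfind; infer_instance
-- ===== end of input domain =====

-- B replaces A's rescan-from-every-start strategy (two nested loops with a heuristic break) by a
-- single backward dynamic-programming pass deriving each run length from the next one; objective: alternative.

-- ===== PORT A =====
-- inner 'while' loop of A (same shape for both loops; cmp is the comparison of that loop);
-- Python arr[i] is ported as pyGetD arr i 0, exact under Pre_ (all reads in range there)
def pvWhileA (arr : List Int) (n : Int) (cmp : Int → Int → Bool) : Nat → Int → Int → Int
  | 0, _, cnt => cnt
  | fuel+1, i, cnt =>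
    if i + 1 < n ∧ cmp (PySem.List.pyGetD arr i 0) (PySem.List.pyGetD arr (i+1) 0) then
      pvWhileA arr n cmp fuel (i+1) (cnt+1)
    else cnt

-- outer 'for k in range(n)' with its early break
def pvForA (arr : List Int) (n : Int) (cmp : Int → Int → Bool) : List Int → Int → Int
  | [], r => r
  | k :: ks, r =>
    if n - k < r then r
    else pvForA arr n cmp ks (max r (pvWhileA arr n cmp n.toNat k 1))

def bigfind (n : Int) (arr : List Int) : Int :=
  max (pvForA arr n (fun x y => decide (x ≤ y)) (PySem.List.pyRange 0 n 1) 0)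
      (pvForA arr n (fun x y => decide (x ≥ y)) (PySem.List.pyRange 0 n 1) 0)

-- ===== PORT B =====
-- one fold step of B's backward pass; state is (best, inc, dec)
def pvStepB (arr : List Int) (s : Int × Int × Int) (k : Int) : Int × Int × Int :=
  let inc := if PySem.List.pyGetD arr k 0 ≤ PySem.List.pyGetD arr (k+1) 0 then s.2.1 + 1 else 1
  let dec := if PySem.List.pyGetD arr k 0 ≥ PySem.List.pyGetD arr (k+1) 0 then s.2.2 + 1 else 1
  (max (max s.1 inc) dec, inc, dec)

-- 'reversed(range(n - 1))' is ported as (pyRange 0 (n-1) 1).reverse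
def bigfind_alt (n : Int) (arr : List Int) : Int :=
  if n ≤ 0 then 0
  else (((PySem.List.pyRange 0 (n-1) 1).reverse).foldl (pvStepB arr) (1, 1, 1)).1

-- ===== PRECONDITION & SPEC =====
-- Pre_ excludes n > max(len(arr), 1): there A reads past the end of arr and raises IndexError,
-- except on inputs where its early break luckily skips the out-of-range reads and it returns a
-- value; B's single backward pass always raises IndexError on those inputs.
def Pre_bigfind (n : Int) (arr : List Int) : Prop := n ≤ arr.length ∨ n ≤ 1
instance (n : Int) (arr : List Int) : Decidable (Pre_bigfind n arr) := by unfold Pre_bigfind; infer_instance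
def pvWitness_bigfind : Int × List Int := (3, [1, 5, 2])
def Spec_bigfind (n : Int) (arr : List Int) (out : Int) : Prop := out = bigfind_alt n arr
instance (n : Int) (arr : List Int) (out : Int) : Decidable (Spec_bigfind n arr out) := by unfold Spec_bigfind; infer_instance

-- ===== CLAIM (what is proved, stated in full; the proofs are below) =====
def Claim_equal_bigfind : Prop := ∀ (n : Int) (arr : List Int), Dom_bigfind n arr → Pre_bigfind n arr → Spec_bigfind n arr (bigfind n arr)

-- ===== LEMMAS AND PROOFS =====

-- run length starting at k, as A's inner while computes it
def pvF (arr : List Int) (n : Int) (cmp : Int → Int → Bool) (k : Int) : Int :=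
  pvWhileA arr n cmp n.toNat k 1

-- the counter only accumulates: shift it out
theorem pvWhileA_shift (arr : List Int) (n : Int) (cmp : Int → Int → Bool) :
    ∀ (fuel : Nat) (i cnt : Int), pvWhileA arr n cmp fuel i cnt = cnt - 1 + pvWhileA arr n cmp fuel i 1 := by
  intro fuel
  induction fuel with
  | zero => intro i cnt; simp [pvWhileA]
  | succ f ih =>
    intro i cnt
    simp only [pvWhileA]
    split_ifs with h
    · rw [ih (i+1) (cnt+1), ih (i+1) (1+1)]
      ring
    · ring

-- enough fuel: the result does not depend on the exact fuel
theorem pvWhileA_fuel (arr : List Int) (n : Int) (cmp : Int → Int → Bool) :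
    ∀ (fuel fuel' : Nat) (i cnt : Int), n - i - 1 ≤ fuel → n - i - 1 ≤ fuel' →
      pvWhileA arr n cmp fuel i cnt = pvWhileA arr n cmp fuel' i cnt := by
  intro fuel
  induction fuel with
  | zero =>
    intro fuel' i cnt h _
    cases fuel' with
    | zero => rfl
    | succ f' =>
      have hni : ¬ (i + 1 < n) := by omega
      simp [pvWhileA, hni]
  | succ f ih =>
    intro fuel' i cnt h h'
    cases fuel' with
    | zero =>
      have hni : ¬ (i + 1 < n) := by omega
      simp [pvWhileA, hni]
    | succ f' =>
      simp only [pvWhileA]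
      split_ifs with hc
      · exact ih f' (i+1) (cnt+1) (by omega) (by omega)
      · rfl

theorem pvWhileA_lower (arr : List Int) (n : Int) (cmp : Int → Int → Bool) :
    ∀ (fuel : Nat) (i cnt : Int), cnt ≤ pvWhileA arr n cmp fuel i cnt := by
  intro fuel
  induction fuel with
  | zero => intro i cnt; simp [pvWhileA]
  | succ f ih =>
    intro i cnt
    simp only [pvWhileA]
    split_ifs with h
    · have := ih (i+1) (cnt+1); omega
    · omega

theorem pvWhileA_upper (arr : List Int) (n : Int) (cmp : Int → Int → Bool) :
    ∀ (fuel : Nat) (i cnt : Int), pvWhileA arr n cmp fuel i cnt ≤ cnt + max 0 (n - i - 1) := by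
  intro fuel
  induction fuel with
  | zero => intro i cnt; simp [pvWhileA]
  | succ f ih =>
    intro i cnt
    simp only [pvWhileA]
    split_ifs with h
    · have := ih (i+1) (cnt+1); omega
    · omega

-- the DP recurrence B uses, derived from A's inner while
theorem pvF_rec (arr : List Int) (n : Int) (cmp : Int → Int → Bool) (k : Int) (hk : 0 ≤ k) :
    pvF arr n cmp k =
      if k + 1 < n ∧ cmp (PySem.List.pyGetD arr k 0) (PySem.List.pyGetD arr (k+1) 0) then
        pvF arr n cmp (k+1) + 1
      else 1 := by
  by_cases hkn : k + 1 < n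
  · obtain ⟨m, hm⟩ : ∃ m : Nat, n.toNat = m + 1 := ⟨n.toNat - 1, by omega⟩
    have key : pvF arr n cmp k
        = if k + 1 < n ∧ cmp (PySem.List.pyGetD arr k 0) (PySem.List.pyGetD arr (k+1) 0) then
            pvWhileA arr n cmp m (k+1) (1+1)
          else 1 := by
      unfold pvF; rw [hm]; rfl
    rw [key]
    by_cases hc : cmp (PySem.List.pyGetD arr k 0) (PySem.List.pyGetD arr (k+1) 0) = true
    · rw [if_pos ⟨hkn, hc⟩, if_pos ⟨hkn, hc⟩, pvWhileA_shift arr n cmp m (k+1) (1+1),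
          pvWhileA_fuel arr n cmp m n.toNat (k+1) 1 (by omega) (by omega)]
      unfold pvF; ring
    · rw [if_neg (fun h => hc h.2), if_neg (fun h => hc h.2)]
  · rw [if_neg (fun h => hkn h.1)]
    unfold pvF
    cases hnt : n.toNat with
    | zero => rfl
    | succ m => simp [pvWhileA, hkn]

theorem pvF_bounds (arr : List Int) (n : Int) (cmp : Int → Int → Bool) (k : Int)
    (_hk : 0 ≤ k) (hkn : k < n) : 1 ≤ pvF arr n cmp k ∧ pvF arr n cmp k ≤ n - k := by
  have h1 := pvWhileA_lower arr n cmp n.toNat k 1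
  have h2 := pvWhileA_upper arr n cmp n.toNat k 1
  unfold pvF
  omega

-- fold of max over values all ≤ r keeps r
theorem pvFoldAbsorb (g : Int → Int) :
    ∀ (l : List Int) (r : Int), (∀ x ∈ l, g x ≤ r) → l.foldl (fun a x => max a (g x)) r = r := by
  intro l
  induction l with
  | nil => intro r _; rfl
  | cons x xs ih =>
    intro r h
    simp only [List.foldl_cons]
    have hx : g x ≤ r := h x (by simp)
    have : max r (g x) = r := by omega
    rw [this]
    exact ih r (fun y hy => h y (by simp [hy]))

-- a constant joined into the accumulator can be pulled out of the fold (two-max step shape)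
theorem pvFoldPull (g1 g2 : Int → Int) :
    ∀ (l : List Int) (r c : Int),
      l.foldl (fun s k => max (max s (g1 k)) (g2 k)) (max r c)
        = max (l.foldl (fun s k => max (max s (g1 k)) (g2 k)) r) c := by
  intro l
  induction l with
  | nil => intro r c; rfl
  | cons x xs ih =>
    intro r c
    simp only [List.foldl_cons]
    have h : max (max (max r c) (g1 x)) (g2 x) = max (max (max r (g1 x)) (g2 x)) c := by omega
    rw [h, ih]

-- folding max over the reversed list gives the same maximum
theorem pvFoldRev (g1 g2 : Int → Int) :
    ∀ (l : List Int) (r : Int),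
      l.reverse.foldl (fun s k => max (max s (g1 k)) (g2 k)) r
        = l.foldl (fun s k => max (max s (g1 k)) (g2 k)) r := by
  intro l
  induction l with
  | nil => intro r; rfl
  | cons x xs ih =>
    intro r
    simp only [List.reverse_cons, List.foldl_append, List.foldl_cons, List.foldl_nil, ih,
      List.foldl_cons]
    have h : max r (max (g1 x) (g2 x)) = max (max r (g1 x)) (g2 x) := by omega
    calc max (max (xs.foldl (fun s k => max (max s (g1 k)) (g2 k)) r) (g1 x)) (g2 x)
        = max (xs.foldl (fun s k => max (max s (g1 k)) (g2 k)) r) (max (g1 x) (g2 x)) := by omega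
      _ = xs.foldl (fun s k => max (max s (g1 k)) (g2 k)) (max r (max (g1 x) (g2 x))) := by
            rw [pvFoldPull]
      _ = _ := by rw [h]

-- A's outer loop with its break equals the plain fold of max over the whole range
theorem pvForA_eq_fold (arr : List Int) (n : Int) (cmp : Int → Int → Bool) :
    ∀ (t : Nat) (a r : Int), 0 ≤ a → (n - a).toNat ≤ t →
      pvForA arr n cmp (PySem.List.pyRange a n 1) r
        = (PySem.List.pyRange a n 1).foldl (fun s k => max s (pvF arr n cmp k)) r := by
  intro t
  induction t with
  | zero =>
    intro a r ha ht
    rw [PySem.List.pyRange_one_eq_nil (by omega)]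
    rfl
  | succ t ih =>
    intro a r ha ht
    by_cases han : a < n
    · rw [PySem.List.pyRange_one_cons han]
      simp only [pvForA, List.foldl_cons]
      split_ifs with hbr
      · -- break: every remaining value is ≤ r
        rw [show max r (pvF arr n cmp a) = r by
              have := pvF_bounds arr n cmp a ha han; omega]
        rw [pvFoldAbsorb]
        intro x hx
        have hx' := (PySem.List.mem_pyRange_one).1 hx
        have := pvF_bounds arr n cmp x (by omega) (by omega)
        omega
      · exact ih (a+1) (max r (pvWhileA arr n cmp n.toNat a 1)) (by omega) (by omega)
    · rw [PySem.List.pyRange_one_eq_nil (by omega)]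
      rfl

-- the two max-folds of A merge into one fold with the doubled step
theorem pvFoldMerge (g1 g2 : Int → Int) :
    ∀ (l : List Int) (r1 r2 : Int),
      max (l.foldl (fun s k => max s (g1 k)) r1) (l.foldl (fun s k => max s (g2 k)) r2)
        = l.foldl (fun s k => max (max s (g1 k)) (g2 k)) (max r1 r2) := by
  intro l
  induction l with
  | nil => intro r1 r2; rfl
  | cons x xs ih =>
    intro r1 r2
    simp only [List.foldl_cons]
    rw [ih]
    have h : max (max r1 (g1 x)) (max r2 (g2 x)) = max (max (max r1 r2) (g1 x)) (g2 x) := by omega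
    rw [h]

-- B's backward fold computes the fold of max(pvF le, pvF ge) over the same indices
theorem pvStepB_fold (arr : List Int) (n : Int) :
    ∀ (m : Nat) (b : Int), (m : Int) + 1 ≤ n →
      ((PySem.List.pyRange 0 (m : Int) 1).reverse).foldl (pvStepB arr)
          (b, pvF arr n (fun x y => decide (x ≤ y)) (m : Int),
              pvF arr n (fun x y => decide (x ≥ y)) (m : Int))
        = (((PySem.List.pyRange 0 (m : Int) 1).reverse).foldl
             (fun s k => max (max s (pvF arr n (fun x y => decide (x ≤ y)) k))
                             (pvF arr n (fun x y => decide (x ≥ y)) k)) b,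
           pvF arr n (fun x y => decide (x ≤ y)) 0,
           pvF arr n (fun x y => decide (x ≥ y)) 0) := by
  intro m
  induction m with
  | zero =>
    intro b _
    simp [PySem.List.pyRange_one_eq_nil (by omega : (0:Int) ≤ 0)]
  | succ m ih =>
    intro b hm
    have hsplit : PySem.List.pyRange 0 ((m : Int) + 1) 1
        = PySem.List.pyRange 0 (m : Int) 1 ++ [(m : Int)] :=
      PySem.List.pyRange_one_succ_right (by omega)
    push_cast
    rw [hsplit]
    simp only [List.reverse_append, List.reverse_cons, List.reverse_nil, List.nil_append,
      List.cons_append, List.foldl_cons]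
    have hinc : pvStepB arr
        (b, pvF arr n (fun x y => decide (x ≤ y)) ((m : Int) + 1),
            pvF arr n (fun x y => decide (x ≥ y)) ((m : Int) + 1)) (m : Int)
        = (max (max b (pvF arr n (fun x y => decide (x ≤ y)) (m : Int)))
               (pvF arr n (fun x y => decide (x ≥ y)) (m : Int)),
           pvF arr n (fun x y => decide (x ≤ y)) (m : Int),
           pvF arr n (fun x y => decide (x ≥ y)) (m : Int)) := by
      have hle := pvF_rec arr n (fun x y => decide (x ≤ y)) (m : Int) (by omega)
      have hge := pvF_rec arr n (fun x y => decide (x ≥ y)) (m : Int) (by omega)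
      have hmn : (m : Int) + 1 < n := by push_cast at hm ⊢; omega
      simp only [hmn, true_and, decide_eq_true_eq] at hle hge
      simp only [pvStepB]
      rw [hle, hge]
    rw [hinc, ih _ (by push_cast at hm ⊢; omega)]

-- ===== VERDICT (by name: the statement is the Claim_ definition above) =====
theorem bigfind_spec : Claim_equal_bigfind := by
  intro n arr _ _
  unfold Spec_bigfind bigfind bigfind_alt
  by_cases hn : n ≤ 0
  · rw [if_pos hn, PySem.List.pyRange_one_eq_nil (by omega)]
    simp [pvForA]
  · rw [if_neg hn]
    have hn1 : 1 ≤ n := by omega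
    rw [pvForA_eq_fold arr n (fun x y => decide (x ≤ y)) n.toNat 0 0 le_rfl (by omega),
        pvForA_eq_fold arr n (fun x y => decide (x ≥ y)) n.toNat 0 0 le_rfl (by omega),
        pvFoldMerge, show max (0 : Int) 0 = 0 from rfl]
    have hsplit : PySem.List.pyRange 0 n 1
        = PySem.List.pyRange 0 (n-1) 1 ++ [n-1] := by
      have h := PySem.List.pyRange_one_succ_right (a := 0) (b := n - 1) (by omega)
      rw [show n - 1 + 1 = n by ring] at h
      exact h
    have hFle : pvF arr n (fun x y => decide (x ≤ y)) (n-1) = 1 := by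
      rw [pvF_rec arr n _ (n-1) (by omega)]
      simp
    have hFge : pvF arr n (fun x y => decide (x ≥ y)) (n-1) = 1 := by
      rw [pvF_rec arr n _ (n-1) (by omega)]
      simp
    -- B side: rewrite the initial (1,1,1) as (1, pvF le (n-1), pvF ge (n-1)) and run the invariant
    have hm : ((n-1).toNat : Int) = n - 1 := by omega
    have hB := pvStepB_fold arr n (n-1).toNat 1 (by omega)
    rw [hm] at hB
    rw [show ((1 : Int), (1 : Int), (1 : Int))
          = (1, pvF arr n (fun x y => decide (x ≤ y)) (n-1),
                pvF arr n (fun x y => decide (x ≥ y)) (n-1)) by rw [hFle, hFge]]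
    rw [hB]
    rw [hsplit, List.foldl_append, pvFoldRev]
    simp only [List.foldl_cons, List.foldl_nil]
    rw [hFle, hFge]
    have hpull := pvFoldPull (pvF arr n (fun x y => decide (x ≤ y)))
      (pvF arr n (fun x y => decide (x ≥ y))) (PySem.List.pyRange 0 (n-1) 1) 0 1
    rw [show max (0 : Int) 1 = 1 from rfl] at hpull
    rw [hpull]
    omega
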